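-- pv_equiv track=rewrite | github.com/DishanH/Pali | fix_remaining_unicode_issues.py | fix_unicode_text
-- ===== SOURCE A (Python) =====
-- def fix_unicode_text(text):
--     """Fix Unicode issues in text"""
--     if not text:
--         return text, 0
--
--     fixes = 0
--     original = text
--
--     # Fix #zwj; placeholders
--     if '#zwj;' in text:
--         count = text.count('#zwj;')
--         text = text.replace('#zwj;', '\u200D')
--         fixes += count
--
--     # Fix Unicode escapes
--     escapes = {
--         '\\u0DCA': '\u0DCA',
--         '\\u200D': '\u200D',
--         '\\u200C': '\u200C',
--         '\\u0D9A': '\u0D9A',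
--         '\\u0DBB': '\u0DBB',
--         '\\u0DBA': '\u0DBA',
--         '\\u0DB8': '\u0DB8',
--     }
--
--     for escape, char in escapes.items():
--         if escape in text:
--             count = text.count(escape)
--             text = text.replace(escape, char)
--             fixes += count
--
--     return text, fixes
-- ===== SOURCE B (Python) =====
-- import re
--
-- _MAPPING = {
--     '#zwj;': '\u200D',
--     '\\u0DCA': '\u0DCA',
--     '\\u200D': '\u200D',
--     '\\u200C': '\u200C',
--     '\\u0D9A': '\u0D9A',
--     '\\u0DBB': '\u0DBB',
--     '\\u0DBA': '\u0DBA',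
--     '\\u0DB8': '\u0DB8',
-- }
--
-- _PATTERN = re.compile('|'.join(re.escape(k) for k in _MAPPING))
--
--
-- def fix_unicode_text(text):
--     """Fix Unicode issues in text (single regex pass)."""
--     if not text:
--         return text, 0
--     new_text, fixes = _PATTERN.subn(lambda m: _MAPPING[m.group(0)], text)
--     return new_text, fixes
-- ===== Notes on version B (the rewrite author's own statement) =====
-- stated objective: idiomatic
-- what changed: Replaced the eight sequential count-then-replace passes over the text with one merged pattern->char dict and a single compiled-regex subn pass whose replacement function looks the match up, returning text and count from one scan.
import Mathlib
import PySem

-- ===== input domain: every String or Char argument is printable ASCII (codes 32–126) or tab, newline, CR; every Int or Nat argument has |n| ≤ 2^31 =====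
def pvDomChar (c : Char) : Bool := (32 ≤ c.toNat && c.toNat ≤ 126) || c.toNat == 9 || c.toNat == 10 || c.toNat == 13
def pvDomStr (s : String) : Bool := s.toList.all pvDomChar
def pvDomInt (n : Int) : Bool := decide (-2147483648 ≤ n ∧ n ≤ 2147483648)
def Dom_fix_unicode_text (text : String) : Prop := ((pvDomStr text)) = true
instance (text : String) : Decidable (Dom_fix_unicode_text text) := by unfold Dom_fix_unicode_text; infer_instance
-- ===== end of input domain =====

-- B replaces A's eight sequential count-then-replace passes by one merged pattern table and a
-- single left-to-right scan (Python: one compiled regex subn); same return value, idiomatic one-pass form.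

-- ===== PORT A =====
-- A's escapes dict, in insertion order
def pvEscapes : List (String × String) :=
  [("\\u0DCA", "\u0DCA"), ("\\u200D", "\u200D"), ("\\u200C", "\u200C"), ("\\u0D9A", "\u0D9A"),
   ("\\u0DBB", "\u0DBB"), ("\\u0DBA", "\u0DBA"), ("\\u0DB8", "\u0DB8")]

-- body of A's 'for escape, char in escapes.items()' loop
def pvFixStep (tf : String × Int) (ec : String × String) : String × Int :=
  if PySem.Str.isIn ec.1 tf.1 then
    (PySem.Str.replace tf.1 ec.1 ec.2, tf.2 + (PySem.Str.count tf.1 ec.1 : Int))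
  else tf

def fix_unicode_text (text : String) : String × Int :=
  if text = "" then (text, 0)
  else
    -- Fix #zwj; placeholders
    let tf0 : String × Int :=
      if PySem.Str.isIn "#zwj;" text then
        (PySem.Str.replace text "#zwj;" "\u200D", (0 : Int) + (PySem.Str.count text "#zwj;" : Int))
      else (text, (0 : Int))
    -- Fix Unicode escapes
    pvEscapes.foldl pvFixStep tf0

-- ===== PORT B =====
-- B's merged mapping, pattern → replacement, in B's dict order
def pvTable : List (List Char × List Char) :=
  [(['#','z','w','j',';'], ['\u200D']),
   (['\\','u','0','D','C','A'], ['\u0DCA']),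
   (['\\','u','2','0','0','D'], ['\u200D']),
   (['\\','u','2','0','0','C'], ['\u200C']),
   (['\\','u','0','D','9','A'], ['\u0D9A']),
   (['\\','u','0','D','B','B'], ['\u0DBB']),
   (['\\','u','0','D','B','A'], ['\u0DBA']),
   (['\\','u','0','D','B','8'], ['\u0DB8'])]

-- hand port of re.subn with an alternation of literal patterns: scan left to right, at each
-- position try the alternatives in pattern order, on a match emit the mapped replacement and
-- jump past the match, counting substitutions (exact for literal alternatives, which regex
-- matches leftmost-first, first-alternative-first)
def pvScan : List Char → List Char × Nat
  | [] => ([], 0)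
  | c :: t =>
    match pvTable.find? (fun e => e.1.isPrefixOf (c :: t)) with
    | some e => let r := pvScan (List.drop (e.1.length - 1) t); (e.2 ++ r.1, r.2 + 1)
    | none => let r := pvScan t; (c :: r.1, r.2)
termination_by l => l.length
decreasing_by
  all_goals simp [List.length_drop]

def fix_unicode_text_alt (text : String) : String × Int :=
  if text = "" then (text, 0)
  else
    let r := pvScan text.toList
    (String.ofList r.1, (r.2 : Int))

-- ===== PRECONDITION & SPEC =====
def Spec_fix_unicode_text (text : String) (out : String × Int) : Prop := out = fix_unicode_text_alt text
instance (text : String) (out : String × Int) : Decidable (Spec_fix_unicode_text text out) := by unfold Spec_fix_unicode_text; infer_instance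

-- ===== CLAIM (what is proved, stated in full; the proofs are below) =====
def Claim_equal_fix_unicode_text : Prop := ∀ (text : String), Dom_fix_unicode_text text → Spec_fix_unicode_text text (fix_unicode_text text)

-- ===== LEMMAS AND PROOFS =====

-- str.replace as a plain recursion (non-overlapping, left to right), proof-side mirror of PySem's fuel loop
def pvRep (old new : List Char) : List Char → List Char
  | [] => []
  | c :: t =>
    if old.isPrefixOf (c :: t) then new ++ pvRep old new (List.drop (old.length - 1) t)
    else c :: pvRep old new t
termination_by l => l.length
decreasing_by
  all_goals simp [List.length_drop]

-- str.count, same recursion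
def pvCnt (old : List Char) : List Char → Nat
  | [] => 0
  | c :: t =>
    if old.isPrefixOf (c :: t) then pvCnt old (List.drop (old.length - 1) t) + 1
    else pvCnt old t
termination_by l => l.length
decreasing_by
  all_goals simp [List.length_drop]

theorem pvRep_nil (old new : List Char) : pvRep old new [] = [] := by rw [pvRep]
theorem pvCnt_nil (old : List Char) : pvCnt old [] = 0 := by rw [pvCnt]

theorem pvIsPrefixOf_false {old l : List Char} (h : ¬ old <+: l) : old.isPrefixOf l = false := by
  cases hb : old.isPrefixOf l with
  | false => rfl
  | true => exact absurd (List.isPrefixOf_iff_prefix.mp hb) h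

theorem pvRep_cons_neg (old new : List Char) (c : Char) (t : List Char) (h : ¬ old <+: c :: t) :
    pvRep old new (c :: t) = c :: pvRep old new t := by
  rw [pvRep]; simp [List.isPrefixOf_iff_prefix, h]

theorem pvCnt_cons_neg (old : List Char) (c : Char) (t : List Char) (h : ¬ old <+: c :: t) :
    pvCnt old (c :: t) = pvCnt old t := by
  rw [pvCnt]; simp [List.isPrefixOf_iff_prefix, h]

theorem pvRep_prefix (old new t : List Char) (h : old ≠ []) :
    pvRep old new (old ++ t) = new ++ pvRep old new t := by
  obtain ⟨o, os, rfl⟩ := List.exists_cons_of_ne_nil h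
  rw [show (o :: os) ++ t = o :: (os ++ t) from rfl, pvRep]
  simp [List.isPrefixOf_iff_prefix, List.prefix_append]

theorem pvCnt_prefix (old t : List Char) (h : old ≠ []) :
    pvCnt old (old ++ t) = pvCnt old t + 1 := by
  obtain ⟨o, os, rfl⟩ := List.exists_cons_of_ne_nil h
  rw [show (o :: os) ++ t = o :: (os ++ t) from rfl, pvCnt]
  simp [List.isPrefixOf_iff_prefix, List.prefix_append]

-- PySem.Chars.replace's fuel loop computes pvRep
theorem pvReplace_go_spec (old new : List Char) (hold : old ≠ []) :
    ∀ (fuel : Nat) (s acc : List Char), s.length ≤ fuel →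
      PySem.Chars.replace.go old new fuel s acc = acc.reverse ++ pvRep old new s := by
  intro fuel
  induction fuel with
  | zero =>
    intro s acc hs
    have : s = [] := List.length_eq_zero_iff.mp (Nat.le_zero.mp hs)
    subst this
    rw [PySem.Chars.replace.go.eq_def, pvRep_nil]
  | succ n ih =>
    intro s acc hs
    cases s with
    | nil =>
      rw [PySem.Chars.replace.go.eq_def, pvRep_nil]
      show acc.reverse = acc.reverse ++ []
      simp
    | cons c t =>
      rw [PySem.Chars.replace.go.eq_def]
      by_cases h : old <+: c :: t
      · have hb : old.isPrefixOf (c :: t) = true := List.isPrefixOf_iff_prefix.mpr h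
        simp only [hb, if_true]
        obtain ⟨o, os, rfl⟩ := List.exists_cons_of_ne_nil hold
        have hdrop : List.drop (o :: os).length (c :: t) = List.drop ((o :: os).length - 1) t := by
          simp
        rw [hdrop, ih _ _ (by simp at hs ⊢; omega)]
        rw [pvRep]
        simp [hb]
      · have hb : old.isPrefixOf (c :: t) = false := pvIsPrefixOf_false h
        simp only [hb, Bool.false_eq_true, if_false]
        rw [ih _ _ (by simp at hs ⊢; omega), pvRep_cons_neg _ _ _ _ h]
        simp

theorem pvReplace_eq_pvRep (s old new : List Char) (h : old ≠ []) :
    PySem.Chars.replace s old new = pvRep old new s := by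
  rw [PySem.Chars.replace]
  have : old.isEmpty = false := by simp [h]
  rw [this]
  simpa using pvReplace_go_spec old new h s.length s [] le_rfl

theorem pvCount_go_spec (old : List Char) (hold : old ≠ []) :
    ∀ (fuel : Nat) (s : List Char) (acc : Nat), s.length ≤ fuel →
      PySem.Chars.count.go old fuel s acc = acc + pvCnt old s := by
  intro fuel
  induction fuel with
  | zero =>
    intro s acc hs
    have : s = [] := List.length_eq_zero_iff.mp (Nat.le_zero.mp hs)
    subst this
    rw [PySem.Chars.count.go.eq_def, pvCnt_nil]
    rfl
  | succ n ih =>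
    intro s acc hs
    cases s with
    | nil => rw [PySem.Chars.count.go.eq_def, pvCnt_nil]; rfl
    | cons c t =>
      rw [PySem.Chars.count.go.eq_def]
      by_cases h : old <+: c :: t
      · have hb : old.isPrefixOf (c :: t) = true := List.isPrefixOf_iff_prefix.mpr h
        simp only [hb, if_true]
        obtain ⟨o, os, rfl⟩ := List.exists_cons_of_ne_nil hold
        have hdrop : List.drop (o :: os).length (c :: t) = List.drop ((o :: os).length - 1) t := by
          simp
        rw [hdrop, ih _ _ (by simp at hs ⊢; omega)]
        rw [pvCnt]
        simp [hb]; omega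
      · have hb : old.isPrefixOf (c :: t) = false := pvIsPrefixOf_false h
        simp only [hb, Bool.false_eq_true, if_false]
        rw [ih _ _ (by simp at hs ⊢; omega), pvCnt_cons_neg _ _ _ h]

theorem pvCount_eq_pvCnt (s old : List Char) (h : old ≠ []) :
    PySem.Chars.count s old = pvCnt old s := by
  rw [PySem.Chars.count]
  have : old.isEmpty = false := by simp [h]
  rw [this]
  simpa using pvCount_go_spec old h s.length s 0 le_rfl

-- if the pattern occurs nowhere, replace is the identity and count is 0
theorem pv_not_infix (old new : List Char) (_ho : old ≠ []) :
    ∀ s : List Char, ¬ old <:+: s → pvRep old new s = s ∧ pvCnt old s = 0 := by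
  intro s
  induction s with
  | nil => intro _; exact ⟨pvRep_nil _ _, pvCnt_nil _⟩
  | cons c t ih =>
    intro h
    have hp : ¬ old <+: c :: t := fun hp => h hp.isInfix
    have ht : ¬ old <:+: t := fun hi => h (hi.trans (List.suffix_cons c t).isInfix)
    rw [pvRep_cons_neg _ _ _ _ hp, pvCnt_cons_neg _ _ _ hp]
    exact ⟨by rw [(ih ht).1], (ih ht).2⟩

-- replacing one pattern cannot create a match of another pattern at the head,
-- provided no replacement character occurs in that pattern
theorem pv_not_prefix_pvRep (old new : List Char) (hnew : new ≠ []) :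
    ∀ (x p : List Char), p ≠ [] → (∀ ch ∈ new, ch ∉ p) → ¬ p <+: x → ¬ p <+: pvRep old new x := by
  intro x
  induction x with
  | nil =>
    intro p hp _ _
    rw [pvRep_nil]
    exact fun h => hp (List.prefix_nil.mp h)
  | cons c t ih =>
    intro p hp hch hnx
    obtain ⟨p0, p', rfl⟩ := List.exists_cons_of_ne_nil hp
    by_cases h : old <+: c :: t
    · have hb : old.isPrefixOf (c :: t) = true := List.isPrefixOf_iff_prefix.mpr h
      rw [pvRep]
      simp only [hb, if_true]
      obtain ⟨n0, new', rfl⟩ := List.exists_cons_of_ne_nil hnew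
      intro hpre
      have h0 : p0 = n0 := (List.cons_prefix_cons.mp hpre).1
      exact hch n0 (by simp) (by simp [h0])
    · rw [pvRep_cons_neg _ _ _ _ h]
      intro hpre
      obtain ⟨h0, hrest⟩ := List.cons_prefix_cons.mp hpre
      subst h0
      by_cases hp' : p' = []
      · exact hnx (by simp [hp'])
      · have hnx' : ¬ p' <+: t := fun hc => hnx (List.cons_prefix_cons.mpr ⟨rfl, hc⟩)
        exact ih p' hp' (fun ch hc hm => hch ch hc (by simp [hm])) hnx' hrest

-- a block the pattern cannot match into is passed through unchanged
theorem pv_skip (old new r : List Char)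
    (hb : ∀ k, k < r.length → ¬ old <+: r.drop k ∧ ¬ r.drop k <+: old) :
    ∀ X : List Char, pvRep old new (r ++ X) = r ++ pvRep old new X ∧ pvCnt old (r ++ X) = pvCnt old X := by
  induction r with
  | nil => intro X; simp
  | cons b r' ih =>
    intro X
    have h0 := hb 0 (by simp)
    simp only [List.drop_zero] at h0
    have hnp : ¬ old <+: (b :: r') ++ X := by
      intro h
      rcases List.prefix_or_prefix_of_prefix h (List.prefix_append (b :: r') X) with h1 | h1
      · exact h0.1 h1
      · exact h0.2 h1
    rw [show (b :: r') ++ X = b :: (r' ++ X) from rfl] at hnp ⊢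
    rw [pvRep_cons_neg _ _ _ _ hnp, pvCnt_cons_neg _ _ _ hnp]
    have ih' := ih (fun k hk => by
      have := hb (k + 1) (by simp; omega)
      simpa using this) X
    exact ⟨by simp [ih'.1], ih'.2⟩

-- the unconditional version of A's loop body, on char lists
def pvStepL (tf : List Char × Int) (e : List Char × List Char) : List Char × Int :=
  (pvRep e.1 e.2 tf.1, tf.2 + (pvCnt e.1 tf.1 : Int))

theorem pvFold_shift (tbl : List (List Char × List Char)) :
    ∀ (X : List Char) (m j : Int),
      List.foldl pvStepL (X, m + j) tbl =
        ((List.foldl pvStepL (X, m) tbl).1, (List.foldl pvStepL (X, m) tbl).2 + j) := by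
  induction tbl with
  | nil => intro X m j; rfl
  | cons e tbl' ih =>
    intro X m j
    simp only [List.foldl_cons, pvStepL]
    rw [show m + j + (pvCnt e.1 X : Int) = (m + (pvCnt e.1 X : Int)) + j by ring]
    exact ih _ _ _

theorem pvFold_nomatch :
    ∀ (tbl : List (List Char × List Char)) (a : Char) (x : List Char) (k : Int),
      (∀ e ∈ tbl, e.1 ≠ [] ∧ e.2 ≠ []) →
      (∀ e ∈ tbl, ∀ e' ∈ tbl, ∀ ch ∈ e.2, ch ∉ e'.1) →
      (∀ e ∈ tbl, ¬ e.1 <+: a :: x) →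
      List.foldl pvStepL (a :: x, k) tbl =
        (a :: (List.foldl pvStepL (x, k) tbl).1, (List.foldl pvStepL (x, k) tbl).2) := by
  intro tbl
  induction tbl with
  | nil => intro a x k _ _ _; rfl
  | cons e tbl' ih =>
    intro a x k hne hcross hnm
    have he := hnm e (by simp)
    simp only [List.foldl_cons, pvStepL, pvRep_cons_neg _ _ _ _ he, pvCnt_cons_neg _ _ _ he]
    have hstep : ∀ e' ∈ tbl', ¬ e'.1 <+: a :: pvRep e.1 e.2 x := by
      intro e' he' hpre
      have h1 : ¬ e'.1 <+: pvRep e.1 e.2 (a :: x) :=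
        pv_not_prefix_pvRep e.1 e.2 ((hne e (by simp)).2) (a :: x) e'.1
          ((hne e' (by simp [he'])).1)
          (fun ch hc => hcross e (by simp) e' (by simp [he']) ch hc)
          (hnm e' (by simp [he']))
      exact h1 (by rwa [pvRep_cons_neg _ _ _ _ he])
    exact ih a (pvRep e.1 e.2 x) (k + (pvCnt e.1 x : Int))
      (fun e' h => hne e' (by simp [h]))
      (fun e' h e'' h' => hcross e' (by simp [h]) e'' (by simp [h'])) hstep

theorem pvFold_skip :
    ∀ (tbl : List (List Char × List Char)) (r : List Char),
      (∀ e ∈ tbl, ∀ j, j < r.length → ¬ e.1 <+: r.drop j ∧ ¬ r.drop j <+: e.1) →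
      ∀ (X : List Char) (k : Int),
        List.foldl pvStepL (r ++ X, k) tbl =
          (r ++ (List.foldl pvStepL (X, k) tbl).1, (List.foldl pvStepL (X, k) tbl).2) := by
  intro tbl
  induction tbl with
  | nil => intro r _ X k; rfl
  | cons e tbl' ih =>
    intro r hb X k
    have hsk := pv_skip e.1 e.2 r (hb e (by simp))
    simp only [List.foldl_cons, pvStepL, (hsk X).1, (hsk X).2]
    exact ih r (fun e' h j hj => hb e' (by simp [h]) j hj) _ _

-- concrete facts about the table, checked by computation
theorem pvTable_ne : ∀ e ∈ pvTable, e.1 ≠ [] ∧ e.2 ≠ [] := by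
  intro e he
  simp only [pvTable, List.mem_cons, List.not_mem_nil, or_false] at he
  rcases he with rfl|rfl|rfl|rfl|rfl|rfl|rfl|rfl <;> exact ⟨by simp, by simp⟩

theorem pvTable_cross : ∀ e ∈ pvTable, ∀ e' ∈ pvTable, ∀ ch ∈ e.2, ch ∉ e'.1 := by
  intro e he e' he'
  simp only [pvTable, List.mem_cons, List.not_mem_nil, or_false] at he he'
  rcases he with rfl|rfl|rfl|rfl|rfl|rfl|rfl|rfl <;>
    rcases he' with rfl|rfl|rfl|rfl|rfl|rfl|rfl|rfl <;>
      (intro ch hch; simp only [List.mem_singleton] at hch; subst hch; decide)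

theorem pvTable_badfree :
    ∀ a ∈ pvTable, ∀ b ∈ pvTable, a.1 ≠ b.1 →
      ∀ j, j < b.1.length → ¬ a.1 <+: b.1.drop j ∧ ¬ b.1.drop j <+: a.1 := by
  intro a ha b hb
  simp only [pvTable, List.mem_cons, List.not_mem_nil, or_false] at ha hb
  rcases ha with rfl|rfl|rfl|rfl|rfl|rfl|rfl|rfl <;>
    rcases hb with rfl|rfl|rfl|rfl|rfl|rfl|rfl|rfl <;> decide

theorem pvTable_single : ∀ e ∈ pvTable, ∃ d, e.2 = [d] := by
  intro e he
  simp only [pvTable, List.mem_cons, List.not_mem_nil, or_false] at he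
  rcases he with rfl|rfl|rfl|rfl|rfl|rfl|rfl|rfl <;> exact ⟨_, rfl⟩

theorem pvScan_nil : pvScan [] = ([], 0) := by rw [pvScan]

theorem pvScan_cons_none (c : Char) (t : List Char)
    (hf : pvTable.find? (fun e => e.1.isPrefixOf (c :: t)) = none) :
    pvScan (c :: t) = (c :: (pvScan t).1, (pvScan t).2) := by
  conv_lhs => rw [pvScan.eq_def]
  simp only [hf]

theorem pvScan_cons_some (c : Char) (t : List Char) (e : List Char × List Char)
    (hf : pvTable.find? (fun e => e.1.isPrefixOf (c :: t)) = some e) :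
    pvScan (c :: t) =
      (e.2 ++ (pvScan (List.drop (e.1.length - 1) t)).1,
       (pvScan (List.drop (e.1.length - 1) t)).2 + 1) := by
  conv_lhs => rw [pvScan.eq_def]
  simp only [hf]

theorem pvFold_nil (tbl : List (List Char × List Char)) (k : Int) :
    List.foldl pvStepL ([], k) tbl = ([], k) := by
  induction tbl with
  | nil => rfl
  | cons e tbl' ih =>
    simp only [List.foldl_cons, pvStepL, pvRep_nil, pvCnt_nil, Nat.cast_zero, add_zero]
    exact ih

-- MAIN LEMMA: A's sequential per-pattern passes compute B's single scan
set_option maxRecDepth 8192 in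
theorem pvMain : ∀ (n : Nat) (l : List Char), l.length ≤ n → ∀ k : Int,
    List.foldl pvStepL (l, k) pvTable = ((pvScan l).1, k + ((pvScan l).2 : Int)) := by
  intro n
  induction n with
  | zero =>
    intro l hl k
    have : l = [] := List.length_eq_zero_iff.mp (Nat.le_zero.mp hl)
    subst this
    rw [pvFold_nil, pvScan_nil]
    simp
  | succ n ih =>
    intro l hl k
    cases l with
    | nil =>
      rw [pvFold_nil, pvScan_nil]
      simp
    | cons c t =>
      cases hf : pvTable.find? (fun e => e.1.isPrefixOf (c :: t)) with
      | none =>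
        have hnm : ∀ e ∈ pvTable, ¬ e.1 <+: c :: t := by
          intro e he
          have := List.find?_eq_none.mp hf e he
          simpa [List.isPrefixOf_iff_prefix] using this
        rw [pvFold_nomatch pvTable c t k pvTable_ne pvTable_cross hnm,
            ih t (by simp at hl; omega) k]
        rw [pvScan_cons_none c t hf]
      | some e =>
        obtain ⟨hpe, pre, post, htbl, hpre⟩ := List.find?_eq_some_iff_append.mp hf
        have hmem : e ∈ pvTable := by rw [htbl]; simp
        have he1 : e.1 ≠ [] := (pvTable_ne e hmem).1
        obtain ⟨d, hd⟩ := pvTable_single e hmem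
        have hprefix : e.1 <+: c :: t := List.isPrefixOf_iff_prefix.mp hpe
        obtain ⟨t', ht'⟩ := hprefix
        -- pre entries skip over the e.1 block
        have hbPre : ∀ e' ∈ pre, ∀ j, j < e.1.length →
            ¬ e'.1 <+: e.1.drop j ∧ ¬ e.1.drop j <+: e'.1 := by
          intro e' he' j hj
          have hm' : e' ∈ pvTable := by rw [htbl]; simp [he']
          have hne1 : e'.1 ≠ e.1 := by
            intro hq
            have := hpre e' he'
            rw [hq, hpe] at this
            simp at this
          exact pvTable_badfree e' hm' e hmem hne1 j hj
        -- split the fold at e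
        rw [htbl, ← ht', List.foldl_append, pvFold_skip pre e.1 hbPre t' k, List.foldl_cons]
        -- the e step
        have hstep :
            pvStepL (e.1 ++ (List.foldl pvStepL (t', k) pre).1, (List.foldl pvStepL (t', k) pre).2) e =
              (d :: (pvStepL (List.foldl pvStepL (t', k) pre) e).1,
               (pvStepL (List.foldl pvStepL (t', k) pre) e).2 + 1) := by
          simp only [pvStepL, pvRep_prefix _ _ _ he1, pvCnt_prefix _ _ he1, hd,
            Prod.mk.injEq, List.singleton_append]
          refine ⟨by simp, by push_cast; ring⟩
        rw [hstep]
        -- post entries never match after the replacement char d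
        have hnmPost : ∀ e' ∈ post,
            ¬ e'.1 <+: d :: (pvStepL (List.foldl pvStepL (t', k) pre) e).1 := by
          intro e' he' hpre'
          have hm' : e' ∈ pvTable := by rw [htbl]; simp [he']
          obtain ⟨q0, q', heq⟩ := List.exists_cons_of_ne_nil (pvTable_ne e' hm').1
          rw [heq] at hpre'
          have hq0 : q0 = d := (List.cons_prefix_cons.mp hpre').1
          exact pvTable_cross e hmem e' hm' d (by simp [hd]) (by simp [heq, hq0])
        rw [pvFold_nomatch post d _ _
          (fun e' h => pvTable_ne e' (by rw [htbl]; simp [h]))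
          (fun e' h e'' h' => pvTable_cross e' (by rw [htbl]; simp [h]) e'' (by rw [htbl]; simp [h']))
          hnmPost]
        rw [pvFold_shift]
        -- reassemble the fold over the whole table on t'
        have hwhole : List.foldl pvStepL (t', k) pvTable =
            List.foldl pvStepL (pvStepL (List.foldl pvStepL (t', k) pre) e) post := by
          rw [htbl, List.foldl_append, List.foldl_cons]
        rw [← hwhole, ih t' (by
          have := congrArg List.length ht'
          simp at this hl
          have hlen : 1 ≤ e.1.length := by
            cases e1 : e.1 with
            | nil => exact absurd e1 he1
            | cons _ _ => simp
          omega) k]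
        -- B's scan takes the same step
        have hdrop : List.drop (e.1.length - 1) t = t' := by
          obtain ⟨a, es, he1e⟩ := List.exists_cons_of_ne_nil he1
          rw [he1e] at ht'
          have hts : es ++ t' = t := by
            have := ht'
            simp at this
            exact this.2
          rw [he1e]
          simp [← hts]
        rw [ht', pvScan_cons_some c t e hf]
        simp only [hd, hdrop, Prod.mk.injEq, List.singleton_append]
        refine ⟨by simp, by push_cast; ring⟩

-- A's guarded loop body equals the unconditional one, through the String/List Char bridge
theorem pvStepS_eq (tf : String × Int) (ec : String × String) (h : ec.1.toList ≠ []) :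
    pvFixStep tf ec =
      (String.ofList (pvStepL (tf.1.toList, tf.2) (ec.1.toList, ec.2.toList)).1,
       (pvStepL (tf.1.toList, tf.2) (ec.1.toList, ec.2.toList)).2) := by
  rw [pvFixStep]
  by_cases hin : PySem.Str.isIn ec.1 tf.1
  · rw [if_pos hin]
    simp only [pvStepL, Prod.mk.injEq]
    refine ⟨?_, ?_⟩
    · simp only [PySem.Str.replace]
      rw [pvReplace_eq_pvRep _ _ _ h]
    · rw [PySem.Str.count_eq, pvCount_eq_pvCnt _ _ h]
  · rw [if_neg hin]
    have hni : ¬ ec.1.toList <:+: tf.1.toList := by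
      rw [PySem.Str.isIn_eq] at hin
      exact (PySem.Chars.isIn_eq_false_iff _ _).mp (by simpa using hin)
    have hid := pv_not_infix ec.1.toList ec.2.toList h tf.1.toList hni
    simp only [pvStepL, hid.1, hid.2]
    simp [String.ofList_toList]

theorem pvFoldS_eq :
    ∀ (tbl : List (String × String)), (∀ ec ∈ tbl, ec.1.toList ≠ []) →
      ∀ (s : String) (k : Int),
        List.foldl pvFixStep (s, k) tbl =
          (String.ofList (List.foldl pvStepL (s.toList, k) (tbl.map fun ec => (ec.1.toList, ec.2.toList))).1,
           (List.foldl pvStepL (s.toList, k) (tbl.map fun ec => (ec.1.toList, ec.2.toList))).2) := by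
  intro tbl
  induction tbl with
  | nil => intro _ s k; simp [String.ofList_toList]
  | cons ec tbl' ih =>
    intro hne s k
    simp only [List.foldl_cons, List.map_cons]
    rw [pvStepS_eq (s, k) ec (hne ec (by simp))]
    rw [ih (fun e h => hne e (by simp [h]))]
    simp [String.toList_ofList]

theorem pvTable_eq_map :
    (("#zwj;", "\u200D") :: pvEscapes).map (fun ec => (ec.1.toList, ec.2.toList)) = pvTable := by
  rfl

theorem pvEntries_ne : ∀ ec ∈ (("#zwj;", "\u200D") :: pvEscapes), ec.1.toList ≠ [] := by
  intro ec hec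
  simp only [pvEscapes, List.mem_cons, List.not_mem_nil, or_false] at hec
  rcases hec with rfl|rfl|rfl|rfl|rfl|rfl|rfl|rfl <;> decide

theorem pvFoldA_eq (text : String) :
    List.foldl pvFixStep (text, 0) (("#zwj;", "\u200D") :: pvEscapes) =
      (String.ofList (List.foldl pvStepL (text.toList, 0) pvTable).1,
       (List.foldl pvStepL (text.toList, 0) pvTable).2) := by
  rw [pvFoldS_eq _ pvEntries_ne text 0, pvTable_eq_map]

theorem pvA_foldl (text : String) (h : ¬ text = "") :
    fix_unicode_text text = List.foldl pvFixStep (text, 0) (("#zwj;", "\u200D") :: pvEscapes) := by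
  simp only [fix_unicode_text, if_neg h, List.foldl_cons]
  rfl

-- ===== VERDICT (by name: the statement is the Claim_ definition above) =====
theorem fix_unicode_text_spec : Claim_equal_fix_unicode_text := by
  intro text _
  unfold Spec_fix_unicode_text
  by_cases h : text = ""
  · simp only [fix_unicode_text, fix_unicode_text_alt, if_pos h]
  · rw [pvA_foldl text h, pvFoldA_eq text,
      pvMain text.toList.length text.toList le_rfl 0]
    unfold fix_unicode_text_alt
    rw [if_neg h]
    simp
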